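-- pv_equiv track=rewrite | github.com/ryanluooooo/UNSW_COMP9021 | 19T1/exercise_5.py | longest_leftmost_sequence_of_consecutive_letters
-- ===== SOURCE A (Python) =====
-- def longest_leftmost_sequence_of_consecutive_letters(word):
--     '''
--     You can assume that "word" is a string of
--     nothing but lowercase letters.
--
--     >>> longest_leftmost_sequence_of_consecutive_letters('')
--     ''
--     >>> longest_leftmost_sequence_of_consecutive_letters('a')
--     'a'
--     >>> longest_leftmost_sequence_of_consecutive_letters('zuba')
--     'z'
--     >>> longest_leftmost_sequence_of_consecutive_letters('ab')
--     'ab'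
--     >>> longest_leftmost_sequence_of_consecutive_letters('bcab')
--     'bc'
--     >>> longest_leftmost_sequence_of_consecutive_letters('aabbccddee')
--     'ab'
--     >>> longest_leftmost_sequence_of_consecutive_letters('aefbxyzcrsdt')
--     'xyz'
--     >>> longest_leftmost_sequence_of_consecutive_letters('efghuvwijlrstuvabcde')
--     'rstuv'
--     '''
--     # REPLACE THE PREVIOUS LINE WITH YOUR CODE
--     lines=''
--     if word:
--         lines = [[word[0]]]
--         first = word[0]
--         for second in str(word)[1:]:
--             if ord(first)+1 == ord(second):
--                 lines[-1].append(second)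
--             else:
--                 lines.append([second])
--             first = second
--         max_len = 0
--         for line in lines:
--             if max_len< len(line):
--                 max_len = len(line)
--
--         for line in lines:
--             if len(line)==max_len:
--                 return (''.join(line))
--     else:
--         return lines
-- ===== SOURCE B (Python) =====
-- def longest_leftmost_sequence_of_consecutive_letters(word):
--     best = ''
--     cur = ''
--     for c in word:
--         if cur and ord(cur[-1]) + 1 == ord(c):
--             cur += c
--         else:
--             cur = c
--         if len(best) < len(cur):
--             best = cur
--     return best
-- ===== Notes on version B (the rewrite author's own statement) =====
-- stated objective: simpler
-- what changed: A materialises the full list of consecutive runs and then makes two more scans (max length, then first run of that length); B does a single pass keeping only the current run and the best-so-far run, updating best only on a strictly longer run so the leftmost winner of a tie is kept.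
import Mathlib
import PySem

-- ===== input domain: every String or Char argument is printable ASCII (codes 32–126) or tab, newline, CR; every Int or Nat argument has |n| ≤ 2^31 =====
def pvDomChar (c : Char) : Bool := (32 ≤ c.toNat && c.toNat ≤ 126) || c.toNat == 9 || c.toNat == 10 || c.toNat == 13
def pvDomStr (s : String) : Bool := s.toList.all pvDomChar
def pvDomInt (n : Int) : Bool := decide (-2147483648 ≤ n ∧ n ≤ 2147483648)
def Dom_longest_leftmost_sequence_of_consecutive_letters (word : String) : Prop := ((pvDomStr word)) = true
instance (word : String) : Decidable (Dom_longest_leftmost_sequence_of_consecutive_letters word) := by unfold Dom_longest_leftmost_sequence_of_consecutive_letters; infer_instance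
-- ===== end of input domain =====

-- B replaces A's build-all-runs-then-two-scans with a single pass keeping only the current
-- run and the best-so-far run (objective: simpler).

-- ===== PORT A =====
-- lines[-1].append(second): append a char to the last run
def pvAppendLast : List (List Char) → Char → List (List Char)
  | [], c => [[c]]
  | [l], c => [l ++ [c]]
  | l :: l' :: ls, c => l :: pvAppendLast (l' :: ls) c

-- the body of A's first loop
def pvStepA (st : List (List Char) × Char) (second : Char) : List (List Char) × Char :=
  if st.2.toNat + 1 == second.toNat then (pvAppendLast st.1 second, second)
  else (st.1 ++ [[second]], second)

-- A's second loop: max_len accumulator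
def pvMaxLen (lines : List (List Char)) : Nat :=
  lines.foldl (fun m l => if m < l.length then l.length else m) 0

-- A's third loop: return ''.join of the first line of maximal length ("" unreachable fallback)
def pvFirstMax : List (List Char) → Nat → String
  | [], _ => ""
  | l :: ls, m => if l.length == m then String.mk l else pvFirstMax ls m

def longest_leftmost_sequence_of_consecutive_letters (word : String) : String :=
  match word.toList with
  | [] => ""
  | c :: rest =>
    let st := rest.foldl pvStepA ([[c]], c)
    pvFirstMax st.1 (pvMaxLen st.1)

-- ===== PORT B =====
-- one loop step of B: (best, cur); 'if cur and ord(cur[-1]) + 1 == ord(c)' via getLast?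
def pvStepB (st : List Char × List Char) (c : Char) : List Char × List Char :=
  let cur : List Char :=
    match st.2.getLast? with
    | some p => if p.toNat + 1 == c.toNat then st.2 ++ [c] else [c]
    | none => [c]
  (if st.1.length < cur.length then cur else st.1, cur)

def longest_leftmost_sequence_of_consecutive_letters_alt (word : String) : String :=
  String.mk (word.toList.foldl pvStepB ([], [])).1

-- ===== PRECONDITION & SPEC =====
def Spec_longest_leftmost_sequence_of_consecutive_letters (word : String) (out : String) : Prop := out = longest_leftmost_sequence_of_consecutive_letters_alt word
instance (word : String) (out : String) : Decidable (Spec_longest_leftmost_sequence_of_consecutive_letters word out) := by unfold Spec_longest_leftmost_sequence_of_consecutive_letters; infer_instance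

-- ===== CLAIM (what is proved, stated in full; the proofs are below) =====
def Claim_equal_longest_leftmost_sequence_of_consecutive_letters : Prop := ∀ (word : String), Dom_longest_leftmost_sequence_of_consecutive_letters word → Spec_longest_leftmost_sequence_of_consecutive_letters word (longest_leftmost_sequence_of_consecutive_letters word)

-- ===== LEMMAS AND PROOFS =====

lemma pvAppendLast_append (init : List (List Char)) (cur : List Char) (c : Char) :
    pvAppendLast (init ++ [cur]) c = init ++ [cur ++ [c]] := by
  induction init with
  | nil => simp [pvAppendLast]
  | cons x xs ih =>
    cases xs with
    | nil => simp [pvAppendLast]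
    | cons y ys => simpa [pvAppendLast] using ih

lemma pvMaxLen_append_single (xs : List (List Char)) (l : List Char) :
    pvMaxLen (xs ++ [l]) = if pvMaxLen xs < l.length then l.length else pvMaxLen xs := by
  simp [pvMaxLen, List.foldl_append]

lemma pvMaxLen_acc_le (xs : List (List Char)) (a : Nat) :
    a ≤ xs.foldl (fun m l => if m < l.length then l.length else m) a := by
  induction xs generalizing a with
  | nil => simp
  | cons x xs ih =>
    simp only [List.foldl]
    refine le_trans ?_ (ih _)
    split <;> omega

lemma pvMaxLen_mem_le (xs : List (List Char)) (a : Nat) (y : List Char) (hy : y ∈ xs) :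
    y.length ≤ xs.foldl (fun m l => if m < l.length then l.length else m) a := by
  induction xs generalizing a with
  | nil => cases hy
  | cons x xs ih =>
    simp only [List.foldl]
    rcases List.mem_cons.mp hy with h | h
    · subst h
      refine le_trans ?_ (pvMaxLen_acc_le xs _)
      split <;> omega
    · exact ih _ h

lemma pvMaxLen_attained (xs : List (List Char)) (a : Nat) :
    xs.foldl (fun m l => if m < l.length then l.length else m) a = a ∨
      ∃ y ∈ xs, y.length = xs.foldl (fun m l => if m < l.length then l.length else m) a := by
  induction xs generalizing a with
  | nil => left; rfl
  | cons x xs ih =>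
    simp only [List.foldl]
    rcases ih (if a < x.length then x.length else a) with h | ⟨y, hy, hlen⟩
    · by_cases hx : a < x.length
      · right
        refine ⟨x, List.mem_cons_self, ?_⟩
        rw [h]; simp [hx]
      · left; rw [h]; simp [hx]
    · right; exact ⟨y, List.mem_cons_of_mem _ hy, hlen⟩

lemma pvFirstMax_append_of_not_mem (xs ys : List (List Char)) (m : Nat)
    (h : ∀ y ∈ xs, y.length ≠ m) :
    pvFirstMax (xs ++ ys) m = pvFirstMax ys m := by
  induction xs with
  | nil => rfl
  | cons x xs ih =>
    have hx := h x List.mem_cons_self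
    simp only [List.cons_append, pvFirstMax, beq_iff_eq, if_neg hx]
    exact ih fun y hy => h y (List.mem_cons_of_mem _ hy)

lemma pvFirstMax_append_of_mem (xs ys : List (List Char)) (m : Nat)
    (h : ∃ y ∈ xs, y.length = m) :
    pvFirstMax (xs ++ ys) m = pvFirstMax xs m := by
  induction xs with
  | nil => rcases h with ⟨y, hy, _⟩; cases hy
  | cons x xs ih =>
    by_cases hx : x.length = m
    · simp [pvFirstMax, hx]
    · rcases h with ⟨y, hy, hlen⟩
      rcases List.mem_cons.mp hy with rfl | hy'
      · exact absurd hlen hx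
      · simp only [List.cons_append, pvFirstMax, beq_iff_eq, if_neg hx]
        exact ih ⟨y, hy', hlen⟩

-- the simulation invariant: A's fold state is (init ++ [cur], first) where cur is the current
-- run, and B's state (best, cur) satisfies best.length = max run length and
-- pvFirstMax lines = String.mk best
lemma pv_main (rest : List Char) :
    ∀ (init : List (List Char)) (cur best : List Char) (first : Char),
    cur.getLast? = some first →
    pvMaxLen (init ++ [cur]) = best.length →
    pvFirstMax (init ++ [cur]) (pvMaxLen (init ++ [cur])) = String.mk best →
    pvFirstMax (rest.foldl pvStepA (init ++ [cur], first)).1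
        (pvMaxLen (rest.foldl pvStepA (init ++ [cur], first)).1)
      = String.mk (rest.foldl pvStepB (best, cur)).1 := by
  induction rest with
  | nil => intro init cur best first _ _ hF; exact hF
  | cons c rest ih =>
    intro init cur best first hLast hM hF
    have hcurne : cur ≠ [] := by
      intro h; rw [h] at hLast; simp at hLast
    have hMge : cur.length ≤ pvMaxLen (init ++ [cur]) := by
      rw [pvMaxLen_append_single]; split <;> omega
    simp only [List.foldl_cons]
    by_cases hcond : first.toNat + 1 = c.toNat
    · -- extend the current run
      have hA : pvStepA (init ++ [cur], first) c = (init ++ [cur ++ [c]], c) := by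
        simp [pvStepA, hcond, pvAppendLast_append]
      have hB : pvStepB (best, cur) c
          = (if best.length < (cur ++ [c]).length then cur ++ [c] else best, cur ++ [c]) := by
        simp [pvStepB, hLast, hcond]
      rw [hA, hB]
      by_cases h2 : best.length < cur.length + 1
      · -- new strict maximum: the extended run becomes best
        have hinit_lt : pvMaxLen init < (cur ++ [c]).length := by
          have : pvMaxLen init ≤ pvMaxLen (init ++ [cur]) := by
            rw [pvMaxLen_append_single]; split <;> omega
          simp only [List.length_append, List.length_cons, List.length_nil]
          omega
        have hM' : pvMaxLen (init ++ [cur ++ [c]]) = (cur ++ [c]).length := by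
          rw [pvMaxLen_append_single, if_pos hinit_lt]
        have hF' : pvFirstMax (init ++ [cur ++ [c]]) (pvMaxLen (init ++ [cur ++ [c]]))
            = String.mk (cur ++ [c]) := by
          rw [hM', pvFirstMax_append_of_not_mem]
          · simp [pvFirstMax]
          · intro y hy
            have := pvMaxLen_mem_le init 0 y hy
            have : y.length ≤ pvMaxLen init := this
            omega
        have := ih init (cur ++ [c]) (cur ++ [c]) c (by simp) (by rw [hM']) hF'
        simpa [if_pos (by simpa using h2)] using this
      · -- extended run still not longer than best: best unchanged
        have hne : ¬ pvMaxLen init < cur.length := by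
          intro hlt
          rw [pvMaxLen_append_single, if_pos hlt] at hM
          simp [List.length_append] at h2
          omega
        have hMinit : pvMaxLen (init ++ [cur]) = pvMaxLen init := by
          rw [pvMaxLen_append_single, if_neg hne]
        have hbig : cur.length + 1 ≤ pvMaxLen init := by
          rw [hMinit] at hM
          simp [List.length_append] at h2
          omega
        have hex : ∃ y ∈ init, y.length = pvMaxLen init := by
          rcases pvMaxLen_attained init 0 with h0 | h
          · exfalso; have : pvMaxLen init = 0 := h0; omega
          · exact h
        have hM' : pvMaxLen (init ++ [cur ++ [c]]) = best.length := by
          rw [pvMaxLen_append_single, if_neg (by simp [List.length_append]; omega),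
            ← hMinit, hM]
        have hF' : pvFirstMax (init ++ [cur ++ [c]]) (pvMaxLen (init ++ [cur ++ [c]]))
            = String.mk best := by
          rw [hM', ← hM, hMinit]
          rw [pvFirstMax_append_of_mem _ _ _ hex]
          rw [hMinit, pvFirstMax_append_of_mem _ _ _ hex] at hF
          rw [← hMinit, hM] at hF ⊢
          exact hF
        have := ih init (cur ++ [c]) best c (by simp) hM' hF'
        rw [if_neg (show ¬ best.length < (cur ++ [c]).length by
          simp only [List.length_append, List.length_cons, List.length_nil]; omega)]
        exact this
    · -- start a new run [c]
      have hA : pvStepA (init ++ [cur], first) c = ((init ++ [cur]) ++ [[c]], c) := by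
        simp [pvStepA, hcond]
      have hB : pvStepB (best, cur) c
          = (if best.length < 1 then [c] else best, [c]) := by
        simp [pvStepB, hLast, hcond]
      have hbest1 : 1 ≤ best.length := by
        have : 1 ≤ cur.length := List.length_pos_iff.mpr hcurne
        omega
      rw [hA, hB, if_neg (by omega)]
      have hex : ∃ y ∈ init ++ [cur], y.length = pvMaxLen (init ++ [cur]) := by
        rcases pvMaxLen_attained (init ++ [cur]) 0 with h0 | h
        · exfalso; have : pvMaxLen (init ++ [cur]) = 0 := h0; omega
        · exact h
      have hM' : pvMaxLen ((init ++ [cur]) ++ [[c]]) = best.length := by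
        rw [pvMaxLen_append_single, if_neg (by simp; omega), hM]
      have hF' : pvFirstMax ((init ++ [cur]) ++ [[c]]) (pvMaxLen ((init ++ [cur]) ++ [[c]]))
          = String.mk best := by
        rw [hM', ← hM, pvFirstMax_append_of_mem _ _ _ hex, hF]
      exact ih (init ++ [cur]) [c] best c (by simp) hM' hF'

-- ===== VERDICT (by name: the statement is the Claim_ definition above) =====
theorem longest_leftmost_sequence_of_consecutive_letters_spec : Claim_equal_longest_leftmost_sequence_of_consecutive_letters := by
  intro word _
  unfold Spec_longest_leftmost_sequence_of_consecutive_letters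
  unfold longest_leftmost_sequence_of_consecutive_letters
    longest_leftmost_sequence_of_consecutive_letters_alt
  cases hw : word.toList with
  | nil => rfl
  | cons c rest =>
    simp only [List.foldl_cons]
    have hB0 : pvStepB ([], []) c = ([c], [c]) := by simp [pvStepB]
    rw [hB0]
    have := pv_main rest [] [c] [c] c (by simp)
      (by simp [pvMaxLen]) (by simp [pvFirstMax, pvMaxLen])
    simpa using this
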